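-- pv_equiv track=rewrite | github.com/ihagonunes/estrutura_dados-atividade1 | atv1-q1.py | IhanBraboSelmineVaimedarDeznaProvaSemCorrigir
-- ===== SOURCE A (Python) =====
-- def IhanBraboSelmineVaimedarDeznaProvaSemCorrigir(lista):
--     if(len(lista)>=3):
--         for i in range (2,len(lista)):
--             for j in range(0,i):
--                 for k in range (0,j):
--                     if lista[j] + lista[k] == lista[i] and (k)!=j:
--                         return "Existe um elemento que é a soma de dois anteriores."
--             if(i==len(lista)-1):
--                 return "Não existe um elemento que é a soma de dois anteriores."
--     else:
--         return "Não há elementos suficientes"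
-- ===== SOURCE B (Python) =====
-- def IhanBraboSelmineVaimedarDeznaProvaSemCorrigir(lista):
--     if len(lista) < 3:
--         return "Não há elementos suficientes"
--     sums = set()
--     seen = []
--     for x in lista:
--         if x in sums:
--             return "Existe um elemento que é a soma de dois anteriores."
--         for y in seen:
--             sums.add(x + y)
--         seen.append(x)
--     return "Não existe um elemento que é a soma de dois anteriores."
-- ===== Notes on version B (the rewrite author's own statement) =====
-- stated objective: faster
-- what changed: Replaces the triple nested index loop with a single pass that maintains the set of pairwise sums of the elements seen so far and tests each new element for membership.
import Mathlib
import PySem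

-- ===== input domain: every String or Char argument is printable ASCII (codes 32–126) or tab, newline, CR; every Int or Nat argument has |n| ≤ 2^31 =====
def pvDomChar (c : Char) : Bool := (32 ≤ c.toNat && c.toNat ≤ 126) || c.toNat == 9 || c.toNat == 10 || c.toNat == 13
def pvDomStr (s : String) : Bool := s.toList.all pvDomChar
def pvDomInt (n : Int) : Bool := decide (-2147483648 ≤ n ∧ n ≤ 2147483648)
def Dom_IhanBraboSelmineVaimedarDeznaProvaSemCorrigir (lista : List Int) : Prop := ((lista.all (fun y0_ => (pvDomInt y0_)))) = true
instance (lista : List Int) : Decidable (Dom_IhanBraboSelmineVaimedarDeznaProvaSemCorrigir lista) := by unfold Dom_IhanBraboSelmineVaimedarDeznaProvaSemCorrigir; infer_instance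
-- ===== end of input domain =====

-- B replaces A's triple nested index loop by a single pass that maintains the set of
-- pairwise sums of the elements seen so far; same return value on every input.

def pvExiste : String := "Existe um elemento que é a soma de dois anteriores."
def pvNaoExiste : String := "Não existe um elemento que é a soma de dois anteriores."
def pvInsuf : String := "Não há elementos suficientes"

-- ===== PORT A =====
-- the two inner loops 'for j in range(0, i): for k in range(0, j): if lista[j] + lista[k] == lista[i] and k != j: return …'
-- (all indices come from range(...), hence are in range: pyGetD is exact here)
def pvInnerA (lista : List Int) (i : Int) : Bool :=
  (PySem.List.pyRange 0 i 1).any (fun j =>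
    (PySem.List.pyRange 0 j 1).any (fun k =>
      decide (PySem.List.pyGetD lista j 0 + PySem.List.pyGetD lista k 0
               = PySem.List.pyGetD lista i 0) && decide (k ≠ j)))

-- the outer 'for i in range(2, len(lista))' with its two early returns
def pvAgoI (lista : List Int) : List Int → String
  | [] => pvNaoExiste        -- unreachable under the len ≥ 3 guard: the 'i == len-1' branch returns first
  | i :: rest =>
    if pvInnerA lista i then pvExiste
    else if i = (lista.length : Int) - 1 then pvNaoExiste
    else pvAgoI lista rest

def IhanBraboSelmineVaimedarDeznaProvaSemCorrigir (lista : List Int) : String :=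
  if lista.length ≥ 3 then
    pvAgoI lista (PySem.List.pyRange 2 (lista.length : Int) 1)
  else pvInsuf

-- ===== PORT B =====
-- 'for x in lista:' carrying the state (sums, seen); early return on set membership
def pvBgo : List Int → PySem.Set Int → List Int → String
  | [], _, _ => pvNaoExiste
  | x :: rest, sums, seen =>
    if PySem.Set.contains sums x then pvExiste
    else pvBgo rest (seen.foldl (fun s y => PySem.Set.add s (x + y)) sums) (seen ++ [x])

def IhanBraboSelmineVaimedarDeznaProvaSemCorrigir_alt (lista : List Int) : String :=
  if lista.length < 3 then pvInsuf
  else pvBgo lista PySem.Set.empty []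

-- ===== PRECONDITION & SPEC =====
def Spec_IhanBraboSelmineVaimedarDeznaProvaSemCorrigir (lista : List Int) (out : String) : Prop := out = IhanBraboSelmineVaimedarDeznaProvaSemCorrigir_alt lista
instance (lista : List Int) (out : String) : Decidable (Spec_IhanBraboSelmineVaimedarDeznaProvaSemCorrigir lista out) := by unfold Spec_IhanBraboSelmineVaimedarDeznaProvaSemCorrigir; infer_instance

-- ===== CLAIM (what is proved, stated in full; the proofs are below) =====
def Claim_equal_IhanBraboSelmineVaimedarDeznaProvaSemCorrigir : Prop := ∀ (lista : List Int), Dom_IhanBraboSelmineVaimedarDeznaProvaSemCorrigir lista → Spec_IhanBraboSelmineVaimedarDeznaProvaSemCorrigir lista (IhanBraboSelmineVaimedarDeznaProvaSemCorrigir lista)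

-- ===== LEMMAS AND PROOFS =====

-- canonical intermediate form: B-shaped one-pass recursion with an explicit index-pair test
def pvPairB (seen : List Int) (x : Int) : Bool :=
  (List.range seen.length).any (fun j =>
    (List.range j).any (fun k => seen.getD j 0 + seen.getD k 0 == x))

def pvTAux : List Int → List Int → Bool
  | [], _ => false
  | x :: rest, seen => pvPairB seen x || pvTAux rest (seen ++ [x])

-- appending x to 'seen' adds exactly the sums x + y, y ∈ seen, to the reachable pair sums
theorem pvPairB_append (seen : List Int) (x z : Int) :
    pvPairB (seen ++ [x]) z = (pvPairB seen z || seen.any (fun y => x + y == z)) := by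
  apply Bool.eq_iff_iff.mpr
  simp only [pvPairB, Bool.or_eq_true, List.any_eq_true, List.mem_range, List.length_append,
    List.length_singleton, beq_iff_eq]
  constructor
  · rintro ⟨j, hj, k, hk, he⟩
    by_cases hjl : j < seen.length
    · left
      exact ⟨j, hjl, k, hk, by
        rwa [List.getD_append _ _ _ _ hjl, List.getD_append _ _ _ _ (by omega)] at he⟩
    · right
      have hj' : j = seen.length := by omega
      subst hj'
      have hk' : k < seen.length := by omega
      refine ⟨seen.getD k 0, ?_, ?_⟩
      · rw [List.getD_eq_getElem seen 0 hk']; exact List.getElem_mem hk'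
      · rw [List.getD_append _ _ _ _ hk'] at he
        have : (seen ++ [x]).getD seen.length 0 = x := by
          rw [List.getD_append_right _ _ _ _ (le_refl _)]; simp
        rw [this] at he; omega
  · rintro (⟨j, hj, k, hk, he⟩ | ⟨y, hy, he⟩)
    · exact ⟨j, by omega, k, hk, by
        rw [List.getD_append _ _ _ _ hj, List.getD_append _ _ _ _ (by omega)]; exact he⟩
    · obtain ⟨k, hk, rfl⟩ := List.getElem_of_mem hy
      refine ⟨seen.length, by omega, k, hk, ?_⟩
      rw [List.getD_append _ _ _ _ hk, List.getD_append_right _ _ _ _ (le_refl _)]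
      simp only [Nat.sub_self, List.getD_cons_zero]
      rw [List.getD_eq_getElem seen 0 hk]; omega

-- membership in the sums set after the inner 'for y in seen: sums.add(x + y)'
theorem pvContains_foldl_add (x z : Int) (seen : List Int) : ∀ (sums : PySem.Set Int),
    PySem.Set.contains (seen.foldl (fun s y => PySem.Set.add s (x + y)) sums) z
      = (PySem.Set.contains sums z || seen.any (fun y => x + y == z)) := by
  induction seen with
  | nil => simp
  | cons y rest ih =>
    intro sums
    apply Bool.eq_iff_iff.mpr
    simp only [List.foldl_cons, ih, Bool.or_eq_true, List.any_cons, PySem.Set.contains_iff,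
      PySem.Set.mem_add, List.any_eq_true, beq_iff_eq]
    constructor
    · rintro ((h | h) | h)
      · exact Or.inl h
      · exact Or.inr (Or.inl (by omega))
      · exact Or.inr (Or.inr h)
    · rintro (h | h | h)
      · exact Or.inl (Or.inl h)
      · exact Or.inl (Or.inr (by omega))
      · exact Or.inr h

-- B's loop, under the invariant 'sums holds exactly the pair sums of seen', computes pvTAux
theorem pvBgo_eq : ∀ (rest : List Int) (sums : PySem.Set Int) (seen : List Int),
    (∀ z : Int, PySem.Set.contains sums z = pvPairB seen z) →
    pvBgo rest sums seen = if pvTAux rest seen then pvExiste else pvNaoExiste := by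
  intro rest
  induction rest with
  | nil => intro sums seen _; simp [pvBgo, pvTAux]
  | cons x rest ih =>
    intro sums seen hinv
    simp only [pvBgo, pvTAux, hinv x]
    by_cases hp : pvPairB seen x
    · simp [hp]
    · simp only [hp, Bool.false_eq_true, if_false, Bool.false_or]
      exact ih _ _ (fun z => by
        rw [pvContains_foldl_add, hinv z, pvPairB_append])

-- A's inner double loop at index m is the pair test against the prefix before m
theorem pvInnerA_eq_pairB (lista : List Int) (m : Nat) (hm : m < lista.length) :
    pvInnerA lista (m : Int) = pvPairB (lista.take m) (lista.getD m 0) := by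
  apply Bool.eq_iff_iff.mpr
  simp only [pvInnerA, pvPairB, List.any_eq_true, PySem.List.mem_pyRange_one,
    List.mem_range, Bool.and_eq_true, decide_eq_true_eq, beq_iff_eq,
    List.length_take, ne_eq]
  constructor
  · rintro ⟨j, ⟨hj0, hjm⟩, k, ⟨hk0, hkj⟩, he, -⟩
    refine ⟨j.toNat, by omega, k.toNat, by omega, ?_⟩
    rw [PySem.List.pyGetD_eq_getElem lista 0 hj0 (by omega), PySem.List.pyGetD_eq_getElem lista 0 hk0 (by omega),
        PySem.List.pyGetD_eq_getElem lista 0 (by omega) (by simpa using hm)] at he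
    rw [List.getD_eq_getElem _ _ (by simp; omega), List.getD_eq_getElem _ _ (by simp; omega),
        List.getD_eq_getElem _ _ hm]
    simp only [List.getElem_take]
    simpa using he
  · rintro ⟨j, hj, k, hk, he⟩
    refine ⟨(j : Int), ⟨by omega, by omega⟩, (k : Int), ⟨by omega, by omega⟩, ?_, by omega⟩
    rw [List.getD_eq_getElem _ _ (by simp; omega), List.getD_eq_getElem _ _ (by simp; omega),
        List.getD_eq_getElem _ _ hm] at he
    simp only [List.getElem_take] at he
    rw [PySem.List.pyGetD_eq_getElem lista 0 (by omega) (by omega),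
        PySem.List.pyGetD_eq_getElem lista 0 (by omega) (by omega),
        PySem.List.pyGetD_eq_getElem lista 0 (by omega) (by simpa using hm)]
    simpa using he

-- A's outer loop returns Existe iff some remaining index passes the inner test
theorem pvAgoI_eq (lista : List Int) : ∀ (c : Nat) (m : Nat), m + c = lista.length → m < lista.length →
    pvAgoI lista (PySem.List.pyRange (m : Int) (lista.length : Int) 1)
      = if (PySem.List.pyRange (m : Int) (lista.length : Int) 1).any (pvInnerA lista)
        then pvExiste else pvNaoExiste := by
  intro c
  induction c with
  | zero => intro m hc hm; omega
  | succ c ih =>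
    intro m hc hm
    rw [PySem.List.pyRange_one_cons (by omega)]
    simp only [List.any_cons, pvAgoI]
    by_cases hi : pvInnerA lista (m : Int)
    · simp [hi]
    · simp only [hi, Bool.false_eq_true, if_false, Bool.false_or]
      by_cases hlast : (m : Int) = (lista.length : Int) - 1
      · have : (lista.length : Int) = (m : Int) + 1 := by omega
        rw [if_pos hlast, this, PySem.List.pyRange_one_eq_nil (by omega)]
        simp
      · rw [if_neg hlast]
        have : ((m : Int) + 1) = ((m + 1 : Nat) : Int) := by push_cast; ring
        rw [this]
        exact ih (m + 1) (by omega) (by omega)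

-- A's index scan from m equals the B-shaped scan of the suffix with the prefix as 'seen'
theorem pvAny_eq_tAux (lista : List Int) : ∀ (c : Nat) (m : Nat), m + c = lista.length →
    (PySem.List.pyRange (m : Int) (lista.length : Int) 1).any (pvInnerA lista)
      = pvTAux (lista.drop m) (lista.take m) := by
  intro c
  induction c with
  | zero =>
    intro m hc
    rw [PySem.List.pyRange_one_eq_nil (by omega), List.drop_of_length_le (by omega)]
    simp [pvTAux]
  | succ c ih =>
    intro m hc
    have hm : m < lista.length := by omega
    rw [PySem.List.pyRange_one_cons (by omega)]
    have hdrop : lista.drop m = lista.getD m 0 :: lista.drop (m + 1) := by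
      rw [List.getD_eq_getElem _ _ hm]
      exact (List.drop_eq_getElem_cons hm)
    rw [hdrop]
    simp only [List.any_cons, pvTAux]
    rw [pvInnerA_eq_pairB lista m hm]
    congr 1
    have h1 : ((m : Int) + 1) = ((m + 1 : Nat) : Int) := by push_cast; ring
    rw [h1, ih (m + 1) (by omega)]
    congr 1
    rw [← List.take_concat_get' ]
    · rw [List.getD_eq_getElem _ _ hm]

-- ===== VERDICT (by name: the statement is the Claim_ definition above) =====
theorem IhanBraboSelmineVaimedarDeznaProvaSemCorrigir_spec : Claim_equal_IhanBraboSelmineVaimedarDeznaProvaSemCorrigir := by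
  intro lista _
  unfold Spec_IhanBraboSelmineVaimedarDeznaProvaSemCorrigir
  by_cases h3 : lista.length ≥ 3
  · rw [IhanBraboSelmineVaimedarDeznaProvaSemCorrigir,
        IhanBraboSelmineVaimedarDeznaProvaSemCorrigir_alt, if_pos h3, if_neg (by omega)]
    have h2 : ((2 : Int)) = ((2 : Nat) : Int) := by norm_num
    rw [h2, pvAgoI_eq lista (lista.length - 2) 2 (by omega) (by omega),
        pvAny_eq_tAux lista (lista.length - 2) 2 (by omega),
        pvBgo_eq lista PySem.Set.empty [] (fun z => by simp [PySem.Set.empty, pvPairB])]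
    obtain ⟨a, b, rest, rfl⟩ : ∃ a b rest, lista = a :: b :: rest := by
      match lista, h3 with
      | a :: b :: c :: rest, _ => exact ⟨a, b, c :: rest, rfl⟩
    simp [pvTAux, pvPairB, List.range_succ]
  · rw [IhanBraboSelmineVaimedarDeznaProvaSemCorrigir,
        IhanBraboSelmineVaimedarDeznaProvaSemCorrigir_alt, if_neg h3, if_pos (by omega)]
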